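-- pv_equiv track=rewrite | github.com/imsherlocked369/VECTOR-VS-TREE-RAG | src/src/vector_rag/chunker.py | build_heading_paths
-- ===== SOURCE A (Python) =====
-- def build_heading_paths(nodes: list[dict]) -> dict[str, str]:
--     node_map = {n["node_id"]: n for n in nodes}
--     path_cache: dict[str, str] = {}
--
--     def resolve(node_id: str) -> str:
--         if node_id in path_cache:
--             return path_cache[node_id]
--
--         node = node_map.get(node_id)
--         if not node:
--             return ""
--
--         title = (node.get("title") or "").strip()
--         parent_id = node.get("parent_id")
--
--         if parent_id and parent_id in node_map:
--             parent_path = resolve(parent_id)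
--             full_path = f"{parent_path} > {title}" if parent_path else title
--         else:
--             full_path = title
--
--         path_cache[node_id] = full_path
--         return full_path
--
--     for node_id in node_map:
--         resolve(node_id)
--
--     return path_cache
-- ===== SOURCE B (Python) =====
-- def build_heading_paths(nodes: list[dict]) -> dict[str, str]:
--     node_map = {n["node_id"]: n for n in nodes}
--     result: dict[str, str] = {}
--     for node_id in node_map:
--         # walk up the parent chain, collecting ids not yet resolved (bottom-up)
--         chain = []
--         cur = node_id
--         while cur is not None and cur not in result:
--             chain.append(cur)
--             p = node_map[cur].get("parent_id")
--             cur = p if (p and p in node_map) else None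
--         acc = result.get(cur, "") if cur is not None else ""
--         # fold the collected titles top-down onto the base path
--         for c in reversed(chain):
--             title = (node_map[c].get("title") or "").strip()
--             acc = f"{acc} > {title}" if acc else title
--             result[c] = acc
--     return result
-- ===== Notes on version B (the rewrite author's own statement) =====
-- stated objective: alternative
-- what changed: Replaces the recursive memoized resolve() helper with an iterative walk up the parent chain that collects the not-yet-resolved ids bottom-up and then folds their titles top-down onto the cached base path.
-- outside the precondition, e.g. on build_heading_paths([{'node_id': None, 'title': 'T'}]): A returns {None: 'T'}, B returns {}
import Mathlib
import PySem

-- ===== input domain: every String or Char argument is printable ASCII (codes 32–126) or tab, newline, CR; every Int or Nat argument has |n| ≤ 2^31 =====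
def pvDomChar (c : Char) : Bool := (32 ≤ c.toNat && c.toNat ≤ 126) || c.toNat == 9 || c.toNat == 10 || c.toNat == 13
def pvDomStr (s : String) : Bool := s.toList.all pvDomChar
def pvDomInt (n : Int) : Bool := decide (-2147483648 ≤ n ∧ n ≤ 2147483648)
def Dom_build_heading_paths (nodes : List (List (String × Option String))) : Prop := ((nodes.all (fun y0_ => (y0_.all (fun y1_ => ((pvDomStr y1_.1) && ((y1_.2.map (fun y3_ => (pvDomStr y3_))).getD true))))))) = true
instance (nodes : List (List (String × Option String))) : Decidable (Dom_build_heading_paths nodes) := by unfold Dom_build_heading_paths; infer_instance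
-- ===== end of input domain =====

-- B replaces A's recursive memoized resolve() by an iterative walk up the parent chain plus a
-- top-down fold of the titles (objective: alternative decomposition, same cost).

-- ===== PORT A =====
-- shared helpers: both Pythons compute these identical sub-expressions
-- (node.get("title") or "").strip()
def pvTitle (node : List (String × Option String)) : String :=
  PySem.Str.strip ((((PySem.Dict.mk node).get? "title").bind (fun v => v)).getD "")

-- node.get("parent_id")
def pvParentId (node : List (String × Option String)) : Option String :=
  ((PySem.Dict.mk node).get? "parent_id").bind (fun v => v)

-- f"{pp} > {t}" if pp else t
def pvJoin (pp t : String) : String := if pp = "" then t else pp ++ " > " ++ t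

-- node_map = {n["node_id"]: n for n in nodes}; a node whose "node_id" is missing (Python: KeyError)
-- or None (a None dict key, outside dict[str,str]) is skipped here — both are excluded by Pre_.
def pvNodeMap (nodes : List (List (String × Option String))) :
    PySem.Dict String (List (String × Option String)) :=
  nodes.foldl
    (fun m n =>
      match ((PySem.Dict.mk n).get? "node_id").bind (fun v => v) with
      | some i => m.insert i n
      | none => m)
    PySem.Dict.empty

-- A's resolve(), fuel-bounded (Pre_ rules out the cyclic inputs on which the Python recursion
-- never terminates; inside Pre_ the chain length is < fuel = nodes.length + 1)
def pvResolve (m : PySem.Dict String (List (String × Option String))) :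
    Nat → String → PySem.Dict String String → String × PySem.Dict String String
  | 0, _, cache => ("", cache)
  | fuel + 1, i, cache =>
    match cache.get? i with
    | some v => (v, cache)                      -- if node_id in path_cache
    | none =>
      match m.get? i with
      | none => ("", cache)                     -- if not node (missing)
      | some node =>
        if node = [] then ("", cache)           -- if not node (empty dict; unreachable from pvNodeMap)
        else
          let t := pvTitle node
          match pvParentId node with
          | some p =>
            if p ≠ "" ∧ m.contains p = true then
              let r := pvResolve m fuel p cache
              let full := pvJoin r.1 t
              (full, r.2.insert i full)
            else (t, cache.insert i t)
          | none => (t, cache.insert i t)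

def build_heading_paths (nodes : List (List (String × Option String))) : List (String × String) :=
  let m := pvNodeMap nodes
  let fuel := nodes.length + 1
  ((m.keys).foldl (fun cache i => (pvResolve m fuel i cache).2) PySem.Dict.empty).items

-- ===== PORT B =====
-- the while loop: walk up from cur collecting ids not yet in result; returns the collected chain
-- (bottom-up) and the base path (result[cur] at the stopping point, "" at a root)
def pvWalk (m : PySem.Dict String (List (String × Option String))) :
    Nat → Option String → PySem.Dict String String → List String × String
  | 0, _, _ => ([], "")
  | fuel + 1, cur, res =>
    match cur with
    | none => ([], "")
    | some c =>
      match res.get? c with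
      | some v => ([], v)
      | none =>
        let node := (m.get? c).getD []          -- node_map[cur]; cur is a key of node_map at every call
        let nxt := match pvParentId node with
          | some p => if p ≠ "" ∧ m.contains p = true then some p else none
          | none => none
        let r := pvWalk m fuel nxt res
        (c :: r.1, r.2)

-- one step of B's inner fold: acc = f"{acc} > {title}" if acc else title; result[c] = acc
def pvFoldStep (m : PySem.Dict String (List (String × Option String)))
    (st : String × PySem.Dict String String) (c : String) : String × PySem.Dict String String :=
  let t := pvTitle ((m.get? c).getD [])
  let acc := pvJoin st.1 t
  (acc, st.2.insert c acc)

def build_heading_paths_alt (nodes : List (List (String × Option String))) : List (String × String) :=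
  let m := pvNodeMap nodes
  let fuel := nodes.length + 1
  ((m.keys).foldl
    (fun res i =>
      let w := pvWalk m fuel (some i) res
      ((w.1.reverse).foldl (pvFoldStep m) (w.2, res)).2)
    PySem.Dict.empty).items

-- ===== PRECONDITION & SPEC =====
-- the next valid parent of a node-map key (the input's parent relation; used only by Pre_)
def pvStep (m : PySem.Dict String (List (String × Option String))) (o : Option String) : Option String :=
  o.bind fun c =>
    match m.get? c with
    | none => none
    | some node =>
      match pvParentId node with
      | some p => if p ≠ "" ∧ m.contains p = true then some p else none
      | none => none

-- Pre_ excludes: a node without a "node_id" key (Python A raises KeyError), a node whose "node_id"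
-- is None (A returns a dict with a None key, not a dict[str,str]; B omits that node), and a cyclic
-- parent chain (A raises RecursionError). The second conjunct is plain acyclicity of the input's
-- parent relation: from every key, iterating the parent map as many times as there are keys ends
-- outside the map.
def Pre_build_heading_paths (nodes : List (List (String × Option String))) : Prop :=
  (∀ n ∈ nodes, (((PySem.Dict.mk n).get? "node_id").bind (fun v => v)).isSome = true) ∧
  (∀ i ∈ (pvNodeMap nodes).keys,
    (pvStep (pvNodeMap nodes))^[(pvNodeMap nodes).keys.length] (some i) = none)

instance (nodes : List (List (String × Option String))) : Decidable (Pre_build_heading_paths nodes) := by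
  unfold Pre_build_heading_paths; infer_instance

def pvWitness_build_heading_paths : (List (List (String × Option String))) :=
  [[("node_id", some "a"), ("title", some " Intro "), ("parent_id", some "b")],
   [("node_id", some "b"), ("title", some "Root"), ("parent_id", none)]]

def Spec_build_heading_paths (nodes : List (List (String × Option String))) (out : List (String × String)) : Prop := out = build_heading_paths_alt nodes
instance (nodes : List (List (String × Option String))) (out : List (String × String)) : Decidable (Spec_build_heading_paths nodes out) := by unfold Spec_build_heading_paths; infer_instance

-- ===== CLAIM (what is proved, stated in full; the proofs are below) =====
def Claim_equal_build_heading_paths : Prop := ∀ (nodes : List (List (String × Option String))), Dom_build_heading_paths nodes → Pre_build_heading_paths nodes → Spec_build_heading_paths nodes (build_heading_paths nodes)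

-- ===== LEMMAS AND PROOFS =====

-- every value stored in pvNodeMap is a nonempty association list (it contains a "node_id" pair)
theorem pvNodeMap_values_ne_nil (nodes : List (List (String × Option String))) :
    ∀ k v, (pvNodeMap nodes).get? k = some v → v ≠ [] := by
  unfold pvNodeMap
  have H : ∀ (l : List (List (String × Option String)))
      (m : PySem.Dict String (List (String × Option String))),
      (∀ k v, m.get? k = some v → v ≠ []) →
      ∀ k v, (l.foldl
        (fun m n =>
          match ((PySem.Dict.mk n).get? "node_id").bind (fun v => v) with
          | some i => m.insert i n
          | none => m) m).get? k = some v → v ≠ [] := by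
    intro l
    induction l with
    | nil => intro m hm; simpa using hm
    | cons n rest ih =>
      intro m hm
      simp only [List.foldl_cons]
      cases hni : ((PySem.Dict.mk n).get? "node_id").bind (fun v => v) with
      | none => exact ih m hm
      | some i =>
        refine ih _ ?_
        intro k v hk
        by_cases hki : k = i
        · subst hki
          rw [PySem.Dict.get?_insert_self] at hk
          cases hk
          intro hnil
          subst hnil
          simp [PySem.Dict.get?] at hni
        · rw [PySem.Dict.get?_insert_of_ne _ _ hki] at hk
          exact hm k v hk
  intro k v
  exact H nodes PySem.Dict.empty (by intro k v h; simp [PySem.Dict.get?_empty] at h) k v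

-- the bridge: from any cursor that is none or a key of m, B's walk-then-fold computes exactly
-- A's memoized resolve (same value AND same cache)
theorem pvWalk_fold_eq_resolve
    (m : PySem.Dict String (List (String × Option String)))
    (hv : ∀ k v, m.get? k = some v → v ≠ []) :
    ∀ (fuel : Nat) (cur : Option String) (cache : PySem.Dict String String),
      (cur = none ∨ ∃ c, cur = some c ∧ m.contains c = true) →
      ((pvWalk m fuel cur cache).1.reverse).foldl (pvFoldStep m) ((pvWalk m fuel cur cache).2, cache)
        = (match cur with
           | none => ("", cache)
           | some c => pvResolve m fuel c cache) := by
  intro fuel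
  induction fuel with
  | zero =>
    intro cur cache _
    cases cur with
    | none => simp [pvWalk]
    | some c => simp [pvWalk, pvResolve]
  | succ fuel ih =>
    intro cur cache hcur
    cases cur with
    | none => simp [pvWalk]
    | some c =>
      rcases hcur with h | ⟨c', hc', hmem⟩
      · exact absurd h (by simp)
      · cases hc'
        simp only [pvWalk, pvResolve]
        cases hres : cache.get? c with
        | some v => simp
        | none =>
          simp only
          cases hmc : m.get? c with
          | none =>
            rw [PySem.Dict.contains_eq_isSome_get?, hmc] at hmem
            simp at hmem
          | some node =>
            have hnode : node ≠ [] := hv c node hmc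
            simp only [Option.getD_some, if_neg hnode]
            cases hp : pvParentId node with
            | none =>
              have h0 : pvWalk m fuel none cache = ([], "") := by
                cases fuel <;> simp [pvWalk]
              simp only [h0]
              simp [pvFoldStep, pvJoin, pvTitle, hmc]
            | some p =>
              by_cases hcond : p ≠ "" ∧ m.contains p = true
              · simp only [if_pos hcond]
                have := ih (some p) cache (Or.inr ⟨p, rfl, hcond.2⟩)
                simp only [List.reverse_cons, List.foldl_append, List.foldl_cons, List.foldl_nil]
                rw [this]
                simp [pvFoldStep, hmc]
              · simp only [if_neg hcond]
                have h0 : pvWalk m fuel none cache = ([], "") := by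
                  cases fuel <;> simp [pvWalk]
                rw [h0]
                simp [pvFoldStep, pvJoin, pvTitle, hmc]

-- ===== VERDICT (by name: the statement is the Claim_ definition above) =====
theorem build_heading_paths_spec : Claim_equal_build_heading_paths := by
  intro nodes _ _
  unfold Spec_build_heading_paths build_heading_paths build_heading_paths_alt
  dsimp only
  congr 1
  apply PySem.List.foldl_congr_mem
  intro cache i hi
  have hmem : (pvNodeMap nodes).contains i = true :=
    (PySem.Dict.contains_iff_mem_keys _ _).mpr hi
  have h := pvWalk_fold_eq_resolve (pvNodeMap nodes) (pvNodeMap_values_ne_nil nodes)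
    (nodes.length + 1) (some i) cache (Or.inr ⟨i, rfl, hmem⟩)
  simp only at h
  exact (congrArg Prod.snd h).symm
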